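-- pv_equiv track=rewrite | github.com/mwisnowski/mtg_python_deckbuilder | code/deck_builder/include_exclude_utils.py | collapse_duplicates
-- ===== SOURCE A (Python) =====
-- from typing import List, Dict, Set, Tuple, Optional
--
-- def normalize_card_name(name: str) -> str:
--     """
--     Normalize card names for robust matching.
--
--     Handles:
--     - Case normalization (casefold)
--     - Punctuation normalization (commas, apostrophes)
--     - Whitespace cleanup
--     - Unicode apostrophe normalization
--     - Arena/Alchemy prefix removal
--
--     Args:
--         name: Raw card name input
--
--     Returns:
--         Normalized card name for matching
--     """
--     if not name:
--         return ""
--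
--     # Basic cleanup
--     s = str(name).strip()
--
--     # Normalize unicode characters
--     s = s.replace('\u2019', "'")  # Curly apostrophe to straight
--     s = s.replace('\u2018', "'")  # Opening single quote
--     s = s.replace('\u201C', '"')  # Opening double quote
--     s = s.replace('\u201D', '"')  # Closing double quote
--     s = s.replace('\u2013', "-")  # En dash
--     s = s.replace('\u2014', "-")  # Em dash
--
--     # Remove Arena/Alchemy prefix
--     if s.startswith('A-') and len(s) > 2:
--         s = s[2:]
--
--     # Normalize whitespace
--     s = " ".join(s.split())
--
--     # Case normalization
--     return s.casefold()
--
-- def collapse_duplicates(card_names: List[str]) -> Tuple[List[str], Dict[str, int]]: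
--     """
--     Remove duplicates from card list and track collapsed counts.
--
--     Commander format allows only one copy of each card (except for exceptions),
--     so duplicate entries in user input should be collapsed to single copies.
--
--     Args:
--         card_names: List of card names (may contain duplicates)
--
--     Returns:
--         Tuple of (unique_names, duplicate_counts)
--     """
--     if not card_names:
--         return [], {}
--
--     seen = {}
--     unique_names = []
--
--     for name in card_names:
--         if not name or not name.strip():
--             continue
--
--         name = name.strip()
--         normalized = normalize_card_name(name)
--
--         if normalized not in seen:
--             seen[normalized] = {'original': name, 'count': 1}
--             unique_names.append(name)
--         else:
--             seen[normalized]['count'] += 1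
--
--     # Extract duplicate counts (only for names that appeared more than once)
--     duplicates = {
--         data['original']: data['count']
--         for data in seen.values()
--         if data['count'] > 1
--     }
--
--     return unique_names, duplicates
-- ===== SOURCE B (Python) =====
-- from typing import List, Dict, Tuple
-- from collections import Counter
--
-- def normalize_card_name(name: str) -> str:
--     if not name:
--         return ""
--     s = str(name).strip()
--     s = s.replace('\u2019', "'")
--     s = s.replace('\u2018', "'")
--     s = s.replace('\u201C', '"')
--     s = s.replace('\u201D', '"')
--     s = s.replace('\u2013', "-")
--     s = s.replace('\u2014', "-")
--     if s.startswith('A-') and len(s) > 2: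
--         s = s[2:]
--     s = " ".join(s.split())
--     return s.casefold()
--
-- def collapse_duplicates(card_names: List[str]) -> Tuple[List[str], Dict[str, int]]:
--     valid = [n.strip() for n in card_names if n and n.strip()]
--     counts = Counter(normalize_card_name(n) for n in valid)
--     unique_names = []
--     first = {}
--     for n in valid:
--         key = normalize_card_name(n)
--         if key not in first:
--             first[key] = n
--             unique_names.append(n)
--     duplicates = {orig: counts[key] for key, orig in first.items() if counts[key] > 1}
--     return unique_names, duplicates
-- ===== Notes on version B (the rewrite author's own statement) =====
-- stated objective: simpler
-- what changed: B replaces A's single loop that maintains a dict of {original,count} records with three separate passes: a filter/strip pass building the valid-name list, a Counter over the normalized names, and a dedup pass recording each normalized form's first original spelling; duplicates are then read off the first-occurrence map against the Counter.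
import Mathlib
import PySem

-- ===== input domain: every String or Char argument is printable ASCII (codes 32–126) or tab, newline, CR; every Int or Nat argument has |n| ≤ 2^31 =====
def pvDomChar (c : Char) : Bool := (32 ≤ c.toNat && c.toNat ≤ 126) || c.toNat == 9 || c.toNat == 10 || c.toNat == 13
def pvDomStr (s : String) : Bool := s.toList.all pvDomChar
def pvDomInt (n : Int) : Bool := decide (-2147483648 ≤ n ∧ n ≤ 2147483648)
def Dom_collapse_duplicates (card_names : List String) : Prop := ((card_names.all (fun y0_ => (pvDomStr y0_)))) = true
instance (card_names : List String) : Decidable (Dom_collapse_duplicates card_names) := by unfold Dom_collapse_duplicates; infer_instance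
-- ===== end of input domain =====

-- B collapses duplicates in three separate passes (filter+strip, a Counter over the
-- normalized names, then a dedup pass) instead of A's single loop that maintains a
-- dict of {original, count} records; objective: simpler decomposition, same cost.

-- ===== PORT A =====
-- shared helper of both sources (Source B carries an identical copy);
-- str.casefold is ported as PySem.Str.lower: exact on the ASCII domain Dom_
def normalize_card_name (name : String) : String :=
  if name = "" then ""
  else
    let s := PySem.Str.strip name
    let s := PySem.Str.replace s "\u2019" "'"
    let s := PySem.Str.replace s "\u2018" "'"
    let s := PySem.Str.replace s "\u201C" "\""
    let s := PySem.Str.replace s "\u201D" "\""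
    let s := PySem.Str.replace s "\u2013" "-"
    let s := PySem.Str.replace s "\u2014" "-"
    let s := if PySem.Str.startswith s "A-" && PySem.Str.len s > 2
             then PySem.Str.slice s (some 2) none else s
    let s := PySem.Str.join " " (PySem.Str.split₀ s)
    PySem.Str.lower s

def collapse_duplicates (card_names : List String) : List String × (List (String × Int)) :=
  if card_names = [] then ([], [])
  else
    let st := card_names.foldl
      (fun (st : PySem.Dict String (String × Int) × List String) name =>
        if name = "" ∨ PySem.Str.strip name = "" then st
        else
          let name := PySem.Str.strip name
          let normalized := normalize_card_name name
          if !st.1.contains normalized then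
            (st.1.insert normalized (name, 1), st.2 ++ [name])
          else
            (st.1.modify normalized ("", 0) (fun p => (p.1, p.2 + 1)), st.2))
      (PySem.Dict.empty, [])
    let duplicates := st.1.items.foldl
      (fun (d : PySem.Dict String Int) p =>
        if p.2.2 > 1 then d.insert p.2.1 p.2.2 else d)
      PySem.Dict.empty
    (st.2, duplicates.items)

-- ===== PORT B =====
def collapse_duplicates_alt (card_names : List String) : List String × (List (String × Int)) :=
  let valid := (card_names.filter
      (fun n => !decide (n = "" ∨ PySem.Str.strip n = ""))).map PySem.Str.strip
  let counts := PySem.Dict.counter (valid.map normalize_card_name)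
  let st := valid.foldl
    (fun (st : List String × PySem.Dict String String) n =>
      let key := normalize_card_name n
      if !st.2.contains key then (st.1 ++ [n], st.2.insert key n) else st)
    ([], PySem.Dict.empty)
  let duplicates := st.2.items.foldl
    (fun (d : PySem.Dict String Int) p =>
      if counts.getD p.1 0 > 1 then d.insert p.2 (counts.getD p.1 0) else d)
    PySem.Dict.empty
  (st.1, duplicates.items)

-- ===== PRECONDITION & SPEC =====
def Spec_collapse_duplicates (card_names : List String) (out : List String × (List (String × Int))) : Prop := out = collapse_duplicates_alt card_names
instance (card_names : List String) (out : List String × (List (String × Int))) : Decidable (Spec_collapse_duplicates card_names out) := by unfold Spec_collapse_duplicates; infer_instance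

-- ===== CLAIM (what is proved, stated in full; the proofs are below) =====
def Claim_equal_collapse_duplicates : Prop := ∀ (card_names : List String), Dom_collapse_duplicates card_names → Spec_collapse_duplicates card_names (collapse_duplicates card_names)

-- ===== LEMMAS AND PROOFS =====

-- proof-side abbreviations for the two loop bodies and the valid-name list
def pvGA (st : PySem.Dict String (String × Int) × List String) (name : String) :
    PySem.Dict String (String × Int) × List String :=
  let normalized := normalize_card_name name
  if !st.1.contains normalized then
    (st.1.insert normalized (name, 1), st.2 ++ [name])
  else
    (st.1.modify normalized ("", 0) (fun p => (p.1, p.2 + 1)), st.2)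

def pvGB (st : List String × PySem.Dict String String) (n : String) :
    List String × PySem.Dict String String :=
  let key := normalize_card_name n
  if !st.2.contains key then (st.1 ++ [n], st.2.insert key n) else st

def pvValid (l : List String) : List String :=
  (l.filter (fun n => !decide (n = "" ∨ PySem.Str.strip n = ""))).map PySem.Str.strip

theorem pv_skip_eq_valid (l : List String)
    (st : PySem.Dict String (String × Int) × List String) :
    l.foldl
      (fun (st : PySem.Dict String (String × Int) × List String) name =>
        if name = "" ∨ PySem.Str.strip name = "" then st
        else
          let name := PySem.Str.strip name
          let normalized := normalize_card_name name
          if !st.1.contains normalized then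
            (st.1.insert normalized (name, 1), st.2 ++ [name])
          else
            (st.1.modify normalized ("", 0) (fun p => (p.1, p.2 + 1)), st.2)) st
    = (pvValid l).foldl pvGA st := by
  induction l generalizing st with
  | nil => rfl
  | cons x xs ih =>
    simp only [List.foldl_cons]
    by_cases h : x = "" ∨ PySem.Str.strip x = ""
    · rw [if_pos h, ih]
      have h' : ¬(¬x = "" ∧ ¬PySem.Str.strip x = "") := by tauto
      have : pvValid (x :: xs) = pvValid xs := by
        simp [pvValid, h']
      rw [this]
    · rw [if_neg h, ih]
      have h' : ¬x = "" ∧ ¬PySem.Str.strip x = "" := by tauto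
      have : pvValid (x :: xs) = PySem.Str.strip x :: pvValid xs := by
        simp [pvValid, h']
      rw [this, List.foldl_cons]
      rfl

theorem pv_containsB (v : List String) (st : List String × PySem.Dict String String)
    (j : String) :
    (v.foldl pvGB st).2.contains j = true ↔
      (st.2.contains j = true ∨ j ∈ v.map normalize_card_name) := by
  induction v generalizing st with
  | nil => simp
  | cons x xs ih =>
    by_cases hc : st.2.contains (normalize_card_name x) = true
    · simp only [List.foldl_cons, pvGB, hc, Bool.not_true, Bool.false_eq_true, if_false, ih,
        List.map_cons, List.mem_cons]
      by_cases hj : j = normalize_card_name x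
      · subst hj; simp [hc]
      · simp [hj]
    · simp only [List.foldl_cons, pvGB, Bool.not_eq_true'] at *
      simp only [hc, Bool.not_false, if_pos, ih, PySem.Dict.contains_insert,
        Bool.or_eq_true, beq_iff_eq, List.map_cons, List.mem_cons]
      tauto

theorem pv_nodupB (v : List String) (st : List String × PySem.Dict String String)
    (h : st.2.keys.Nodup) : (v.foldl pvGB st).2.keys.Nodup := by
  induction v generalizing st with
  | nil => exact h
  | cons x xs ih =>
    simp only [List.foldl_cons, pvGB]
    by_cases hc : st.2.contains (normalize_card_name x)
    · simpa [hc] using ih st h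
    · simp only [hc, Bool.not_false, if_pos]
      exact ih _ (PySem.Dict.nodup_keys_insert _ _ _ h)

theorem pv_contains_mapfst (d : PySem.Dict String String)
    (f : String × String → String × Int) (k : String) :
    (PySem.Dict.mk (d.items.map (fun p => (p.1, f p)))).contains k = d.contains k := by
  show _ = (PySem.Dict.mk d.items).contains k
  simp only [PySem.Dict.contains_mk, List.any_map]
  rfl

-- the main invariant: A's fold state is B's fold state decorated with full counts
theorem pv_main (v : List String) :
    v.foldl pvGA (PySem.Dict.empty, [])
      = (PySem.Dict.mk
           (((v.foldl pvGB ([], PySem.Dict.empty)).2).items.map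
             (fun p => (p.1, (p.2, ((v.map normalize_card_name).count p.1 : Int))))),
         (v.foldl pvGB ([], PySem.Dict.empty)).1) := by
  induction v using List.reverseRecOn with
  | nil => rfl
  | append_singleton v x ih =>
    rw [List.foldl_append, List.foldl_append, ih]
    simp only [List.foldl_cons, List.foldl_nil]
    have hnodup : (v.foldl pvGB ([], PySem.Dict.empty)).2.keys.Nodup :=
      pv_nodupB v _ (by simp)
    have hmem : ∀ j, (v.foldl pvGB ([], PySem.Dict.empty)).2.contains j = true ↔
        j ∈ v.map normalize_card_name := by
      intro j; rw [pv_containsB]; simp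
    have hcont := pv_contains_mapfst (v.foldl pvGB ([], PySem.Dict.empty)).2
      (fun p => (p.2, ((v.map normalize_card_name).count p.1 : Int)))
      (normalize_card_name x)
    by_cases hc : (v.foldl pvGB ([], PySem.Dict.empty)).2.contains (normalize_card_name x) = true
    · -- duplicate key: A modifies the count, B leaves its state unchanged
      have hA : (PySem.Dict.mk ((v.foldl pvGB ([], PySem.Dict.empty)).2.items.map
          (fun p => (p.1, (p.2, ((v.map normalize_card_name).count p.1 : Int)))))).contains
          (normalize_card_name x) = true := by rw [hcont]; exact hc
      obtain ⟨p0, hp0, hp0k⟩ : ∃ p ∈ (v.foldl pvGB ([], PySem.Dict.empty)).2.items,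
          p.1 = normalize_card_name x := by
        have h1 : normalize_card_name x ∈ (v.foldl pvGB ([], PySem.Dict.empty)).2.keys :=
          (PySem.Dict.contains_iff_mem_keys _ _).mp hc
        simp only [PySem.Dict.keys] at h1
        obtain ⟨p, hp, hpk⟩ := List.mem_map.mp h1
        exact ⟨p, hp, hpk⟩
      have hmemA : (normalize_card_name x,
          (p0.2, ((v.map normalize_card_name).count (normalize_card_name x) : Int))) ∈
          ((v.foldl pvGB ([], PySem.Dict.empty)).2.items.map
            (fun p => (p.1, (p.2, ((v.map normalize_card_name).count p.1 : Int))))) :=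
        List.mem_map.mpr ⟨p0, hp0, by rw [hp0k]⟩
      have hnodupA : (PySem.Dict.mk ((v.foldl pvGB ([], PySem.Dict.empty)).2.items.map
          (fun p => (p.1, (p.2, ((v.map normalize_card_name).count p.1 : Int)))))).keys.Nodup := by
        simpa [PySem.Dict.keys, List.map_map, Function.comp_def] using hnodup
      have hgetD : (PySem.Dict.mk ((v.foldl pvGB ([], PySem.Dict.empty)).2.items.map
          (fun p => (p.1, (p.2, ((v.map normalize_card_name).count p.1 : Int)))))).getD
          (normalize_card_name x) ("", 0)
          = (p0.2, ((v.map normalize_card_name).count (normalize_card_name x) : Int)) :=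
        PySem.Dict.getD_of_mem_items _ hmemA hnodupA ("", 0)
      simp only [pvGA, pvGB, hA, hc, Bool.not_true, Bool.false_eq_true, if_false,
        PySem.Dict.modify, hgetD]
      simp only [Prod.mk.injEq]
      refine ⟨?_, trivial⟩
      apply PySem.Dict.ext
      rw [PySem.Dict.items_insert_of_contains _ _ hA]
      show (((v.foldl pvGB ([], PySem.Dict.empty)).2.items.map
          (fun p => (p.1, (p.2, ((v.map normalize_card_name).count p.1 : Int))))).map _) = _
      rw [List.map_map]
      apply List.map_congr_left
      intro p hp
      have hgp : (v.foldl pvGB ([], PySem.Dict.empty)).2.get? p.1 = some p.2 :=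
        PySem.Dict.get?_of_mem_items _ (by exact hp) hnodup
      by_cases hpk : p.1 = normalize_card_name x
      · have hgo : (v.foldl pvGB ([], PySem.Dict.empty)).2.get? (normalize_card_name x)
            = some p0.2 := PySem.Dict.get?_of_mem_items _ (by rw [← hp0k]; exact hp0) hnodup
        have hpo : p.2 = p0.2 := by
          rw [hpk] at hgp; rw [hgp] at hgo; exact (Option.some.injEq _ _).mp hgo
        simp only [Function.comp_def, hpk, beq_self_eq_true, if_true, hpo,
          List.map_append, List.count_append]
        simp
      · simp only [Function.comp_def]
        rw [if_neg (by simpa using hpk)]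
        simp only [List.map_append, List.count_append]
        simp [Ne.symm hpk]
    · -- fresh key: both sides append a new entry
      have hcf : (v.foldl pvGB ([], PySem.Dict.empty)).2.contains (normalize_card_name x)
          = false := by simpa using hc
      have hA : (PySem.Dict.mk ((v.foldl pvGB ([], PySem.Dict.empty)).2.items.map
          (fun p => (p.1, (p.2, ((v.map normalize_card_name).count p.1 : Int)))))).contains
          (normalize_card_name x) = false := by rw [hcont]; exact hcf
      have hzero : (v.map normalize_card_name).count (normalize_card_name x) = 0 :=
        List.count_eq_zero.mpr (fun h => hc ((hmem _).mpr h))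
      simp only [pvGA, pvGB, hA, hcf, Bool.not_false, if_pos]
      simp only [Prod.mk.injEq]
      refine ⟨?_, trivial⟩
      apply PySem.Dict.ext
      rw [PySem.Dict.items_insert_of_not_contains _ _ hA]
      rw [PySem.Dict.items_insert_of_not_contains _ _ hcf]
      show ((v.foldl pvGB ([], PySem.Dict.empty)).2.items.map
          (fun p => (p.1, (p.2, ((v.map normalize_card_name).count p.1 : Int))))) ++ _ = _
      rw [List.map_append]
      congr 1
      · apply List.map_congr_left
        intro p hp
        have hpc : (v.foldl pvGB ([], PySem.Dict.empty)).2.contains p.1 = true := by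
          rw [PySem.Dict.contains_iff_mem_keys]
          simp only [PySem.Dict.keys]
          exact List.mem_map.mpr ⟨p, hp, rfl⟩
        have hpk : p.1 ≠ normalize_card_name x := fun h => by rw [h, hcf] at hpc; cases hpc
        simp only [List.map_append, List.count_append]
        simp [Ne.symm hpk]
      · simp [List.map_append, List.count_append, List.count_cons, hzero]

theorem pv_dup_fold (v : List String) :
    ((((v.foldl pvGB ([], PySem.Dict.empty)).2).items.map
        (fun p => (p.1, (p.2, ((v.map normalize_card_name).count p.1 : Int))))).foldl
      (fun (d : PySem.Dict String Int) p =>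
        if p.2.2 > 1 then d.insert p.2.1 p.2.2 else d) PySem.Dict.empty)
    = ((v.foldl pvGB ([], PySem.Dict.empty)).2).items.foldl
      (fun (d : PySem.Dict String Int) p =>
        if (PySem.Dict.counter (v.map normalize_card_name)).getD p.1 0 > 1
        then d.insert p.2 ((PySem.Dict.counter (v.map normalize_card_name)).getD p.1 0)
        else d) PySem.Dict.empty := by
  rw [List.foldl_map]
  have hf : (fun (d : PySem.Dict String Int) (p : String × String) =>
      if ((v.map normalize_card_name).count p.1 : Int) > 1
      then d.insert p.2 (((v.map normalize_card_name).count p.1 : Int)) else d)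
    = (fun (d : PySem.Dict String Int) p =>
      if (PySem.Dict.counter (v.map normalize_card_name)).getD p.1 0 > 1
      then d.insert p.2 ((PySem.Dict.counter (v.map normalize_card_name)).getD p.1 0)
      else d) := by
    funext d p
    rw [PySem.Dict.getD_counter]
  exact hf ▸ rfl

theorem pv_final (v : List String) :
    (((v.foldl pvGA (PySem.Dict.empty, [])).2,
      ((v.foldl pvGA (PySem.Dict.empty, [])).1.items.foldl
        (fun (d : PySem.Dict String Int) p =>
          if p.2.2 > 1 then d.insert p.2.1 p.2.2 else d) PySem.Dict.empty).items)
      : List String × List (String × Int))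
    = ((v.foldl pvGB ([], PySem.Dict.empty)).1,
      (((v.foldl pvGB ([], PySem.Dict.empty)).2).items.foldl
        (fun (d : PySem.Dict String Int) p =>
          if (PySem.Dict.counter (v.map normalize_card_name)).getD p.1 0 > 1
          then d.insert p.2 ((PySem.Dict.counter (v.map normalize_card_name)).getD p.1 0)
          else d) PySem.Dict.empty).items) := by
  rw [pv_main]
  exact congrArg _ (congrArg _ (pv_dup_fold v))

-- ===== VERDICT (by name: the statement is the Claim_ definition above) =====
theorem collapse_duplicates_spec : Claim_equal_collapse_duplicates := by
  intro l _
  unfold Spec_collapse_duplicates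
  rcases eq_or_ne l [] with rfl | hne
  · rfl
  · unfold collapse_duplicates collapse_duplicates_alt
    simp only [if_neg hne]
    rw [pv_skip_eq_valid]
    exact pv_final (pvValid l)
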